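-- pv_equiv track=rewrite | github.com/wazuh/wazuh | tools/policy-migration/refactor_regex.py | swap_in_rn_tokens_quants
-- ===== SOURCE A (Python) =====
-- from typing import List, Tuple, Set, Optional
--
-- _QUANTIFIER_PREV_ALLOWED = set(['w', 'd', 's', 't', 'p', 'W', 'D', 'S', '.'])
--
-- def _escape_literal_quantifiers(payload: str, quote_char: Optional[str]) -> str:
--     """Escape literal '*' and '+' that old engine treated as literals.
--     Old engine: '*' or '+' is a quantifier only if preceded by one of: \\w, \\d, \\s, \\t, \\p, \\W, \\D, \\S, or \\. .
--     Otherwise it's literal and must be escaped for PCRE2.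
--     Quote-aware escaping: double-quoted -> prefix with '\\', single/unquoted -> prefix with '\'.
--     """
--     out: List[str] = []
--     i = 0
--     n = len(payload)
--     is_double = (quote_char == '"')
--
--     def prev_token_allows_quantifier(idx: int) -> bool:
--         # Check immediate previous escaped token: \\x (single/unquoted) or \\\\x (double-quoted), where x in allowed set.
--         if idx <= 0:
--             return False
--         if quote_char == '"':
--             # Expect two backslashes before token char
--             if idx - 3 >= 0 and payload[idx - 3] == '\\' and payload[idx - 2] == '\\' and payload[idx - 1] in _QUANTIFIER_PREV_ALLOWED:
--                 return True
--         else: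
--             if idx - 2 >= 0 and payload[idx - 2] == '\\' and payload[idx - 1] in _QUANTIFIER_PREV_ALLOWED:
--                 return True
--         return False
--
--     while i < n:
--         ch = payload[i]
--         if ch in ('*', '+'):
--             if prev_token_allows_quantifier(i):
--                 out.append(ch)
--             else:
--                 out.append('\\\\' + ch if is_double else '\\' + ch)
--             i += 1
--             continue
--         out.append(ch)
--         i += 1
--     return ''.join(out)
--
-- def swap_in_rn_tokens_quants(text: str, quote_char: Optional[str]) -> Tuple[str, bool]:
--     i = 0
--     s = text
--     out: List[str] = []
--     n = len(s)
--     def read_until_boundary(k: int) -> Tuple[str, int]: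
--         j = k
--         while j < n and not (s.startswith(' && ', j) or s.startswith(' compare ', j)):
--             j += 1
--         return s[k:j], j
--     while i < n:
--         if i + 2 < n and s[i] == '!' and s[i + 1] in ('r', 'n') and s[i + 2] == ':':
--             out.append(s[i:i+3])
--             i += 3
--             payload, next_i = read_until_boundary(i)
--             out.append(_escape_literal_quantifiers(payload, quote_char))
--             i = next_i
--             continue
--         if i + 1 < n and s[i] in ('r', 'n') and s[i + 1] == ':':
--             out.append(s[i:i+2])
--             i += 2
--             payload, next_i = read_until_boundary(i)
--             out.append(_escape_literal_quantifiers(payload, quote_char))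
--             i = next_i
--             continue
--         out.append(s[i])
--         i += 1
--     updated = ''.join(out)
--     return updated, (updated != text)
-- ===== SOURCE B (Python) =====
-- from typing import List, Tuple, Optional
--
-- _QUANTIFIER_PREV_ALLOWED = set(['w', 'd', 's', 't', 'p', 'W', 'D', 'S', '.'])
--
-- def _escape_literal_quantifiers(payload: str, quote_char: Optional[str]) -> str:
--     out: List[str] = []
--     i = 0
--     n = len(payload)
--     is_double = (quote_char == '"')
--
--     def prev_token_allows_quantifier(idx: int) -> bool:
--         if idx <= 0:
--             return False
--         if quote_char == '"':
--             if idx - 3 >= 0 and payload[idx - 3] == '\\' and payload[idx - 2] == '\\' and payload[idx - 1] in _QUANTIFIER_PREV_ALLOWED: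
--                 return True
--         else:
--             if idx - 2 >= 0 and payload[idx - 2] == '\\' and payload[idx - 1] in _QUANTIFIER_PREV_ALLOWED:
--                 return True
--         return False
--
--     while i < n:
--         ch = payload[i]
--         if ch in ('*', '+'):
--             if prev_token_allows_quantifier(i):
--                 out.append(ch)
--             else:
--                 out.append('\\\\' + ch if is_double else '\\' + ch)
--             i += 1
--             continue
--         out.append(ch)
--         i += 1
--     return ''.join(out)
--
-- def swap_in_rn_tokens_quants(text: str, quote_char: Optional[str]) -> Tuple[str, bool]:
--     # Jump-based scanner: locate token starts and payload boundaries with str.find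
--     # instead of examining every character.
--     out: List[str] = []
--     n = len(text)
--     i = 0
--     while True:
--         hits = [p for p in (text.find('r:', i), text.find('n:', i)) if p != -1]
--         if not hits:
--             out.append(text[i:])
--             break
--         p = min(hits)
--         start = p - 1 if p > i and text[p - 1] == '!' else p
--         out.append(text[i:start])
--         out.append(text[start:p + 2])
--         bounds = [b for b in (text.find(' && ', p + 2), text.find(' compare ', p + 2)) if b != -1]
--         j = min(bounds) if bounds else n
--         out.append(_escape_literal_quantifiers(text[p + 2:j], quote_char))
--         i = j
--     updated = ''.join(out)
--     return updated, updated != text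
-- ===== Notes on version B (the rewrite author's own statement) =====
-- stated objective: faster
-- what changed: Replaced A's character-by-character while-loop scanner (with its inner read_until_boundary char walk) by a jump scanner that locates the next r:/n: token start and the next ' && '/' compare ' payload boundary with str.find and copies the intervening text by slicing.
import Mathlib
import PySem

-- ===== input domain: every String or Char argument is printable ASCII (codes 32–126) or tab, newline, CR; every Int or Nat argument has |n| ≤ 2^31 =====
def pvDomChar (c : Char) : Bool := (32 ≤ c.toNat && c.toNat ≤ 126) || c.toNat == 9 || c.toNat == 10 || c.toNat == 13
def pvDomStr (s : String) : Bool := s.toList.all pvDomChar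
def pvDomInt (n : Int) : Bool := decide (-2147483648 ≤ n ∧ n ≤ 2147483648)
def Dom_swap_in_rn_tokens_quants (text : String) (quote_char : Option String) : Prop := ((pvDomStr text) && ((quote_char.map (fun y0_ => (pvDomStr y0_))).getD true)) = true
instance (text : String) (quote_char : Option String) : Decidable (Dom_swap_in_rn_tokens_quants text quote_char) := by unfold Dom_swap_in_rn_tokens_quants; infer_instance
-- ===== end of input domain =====

-- B replaces A's character-by-character scanner with a str.find-based jump scanner
-- (locate the next `r:`/`n:` token and the next payload boundary by substring search,
-- copy the text in between by slicing); measurably faster by a constant factor in Python.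

-- ===== PORT A =====
-- shared helper: _escape_literal_quantifiers (identical code in Source A and Source B),
-- ported with `prev` = the reversed already-consumed prefix of the ORIGINAL payload.
def pvAllowed (c : Char) : Bool :=
  c = 'w' || c = 'd' || c = 's' || c = 't' || c = 'p' || c = 'W' || c = 'D' || c = 'S' || c = '.'

def pvPrevAllows (quote_char : Option String) (prev : List Char) : Bool :=
  if quote_char = some "\"" then
    match prev with
    | c1 :: c2 :: c3 :: _ => c3 = '\\' && c2 = '\\' && pvAllowed c1
    | _ => false
  else
    match prev with
    | c1 :: c2 :: _ => c2 = '\\' && pvAllowed c1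
    | _ => false

def pvEscape (quote_char : Option String) (prev payload : List Char) : List Char :=
  match payload with
  | [] => []
  | c :: rest =>
    if c = '*' || c = '+' then
      (if pvPrevAllows quote_char prev then [c]
       else if quote_char = some "\"" then ['\\', '\\', c] else ['\\', c])
        ++ pvEscape quote_char (c :: prev) rest
    else c :: pvEscape quote_char (c :: prev) rest

-- A's boundary test: s.startswith(' && ', j) or s.startswith(' compare ', j)
def pvIsBoundary (l : List Char) : Bool :=
  PySem.Chars.startswith l [' ', '&', '&', ' '] || PySem.Chars.startswith l [' ', 'c', 'o', 'm', 'p', 'a', 'r', 'e', ' ']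

-- A's read_until_boundary, on the suffix starting at k: (payload, rest)
def pvReadUntil : List Char → List Char × List Char
  | [] => ([], [])
  | c :: t =>
    if pvIsBoundary (c :: t) then ([], c :: t)
    else
      let r := pvReadUntil t
      (c :: r.1, r.2)

theorem pvReadUntil_snd_length (l : List Char) : (pvReadUntil l).2.length ≤ l.length := by
  induction l with
  | nil => simp [pvReadUntil]
  | cons c t ih =>
    simp only [pvReadUntil]
    split
    · simp
    · simpa using Nat.le_succ_of_le ih

-- A's main while-loop, on the suffix starting at i
def pvScanA (quote_char : Option String) (l : List Char) : List Char :=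
  match l with
  | [] => []
  | c0 :: t0 =>
    match t0 with
    | [] => [c0]
    | c1 :: t1 =>
      if c0 = '!' then
        match t1 with
        | [] => c0 :: pvScanA quote_char [c1]
        | c2 :: t2 =>
          if (c1 = 'r' ∨ c1 = 'n') ∧ c2 = ':' then
            let pr := pvReadUntil t2
            c0 :: c1 :: c2 :: (pvEscape quote_char [] pr.1 ++ pvScanA quote_char pr.2)
          else c0 :: pvScanA quote_char (c1 :: c2 :: t2)
      else if (c0 = 'r' ∨ c0 = 'n') ∧ c1 = ':' then
        let pr := pvReadUntil t1
        c0 :: c1 :: (pvEscape quote_char [] pr.1 ++ pvScanA quote_char pr.2)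
      else c0 :: pvScanA quote_char (c1 :: t1)
termination_by l.length
decreasing_by
  · simp
  · have := pvReadUntil_snd_length t2; simp; omega
  · simp
  · have := pvReadUntil_snd_length t1; simp; omega
  · simp

def swap_in_rn_tokens_quants (text : String) (quote_char : Option String) : String × Bool :=
  let updated := String.ofList (pvScanA quote_char text.toList)
  (updated, updated != text)

-- ===== PORT B =====
-- B's token search: hits = [p for p in (find('r:', i), find('n:', i)) if p != -1]; min or None
def pvTokFind (l : List Char) : Option Nat :=
  if PySem.Chars.find l ['r', ':'] = -1 ∧ PySem.Chars.find l ['n', ':'] = -1 then none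
  else if PySem.Chars.find l ['r', ':'] = -1 then some (PySem.Chars.find l ['n', ':']).toNat
  else if PySem.Chars.find l ['n', ':'] = -1 then some (PySem.Chars.find l ['r', ':']).toNat
  else some (min (PySem.Chars.find l ['r', ':']) (PySem.Chars.find l ['n', ':'])).toNat

-- B's boundary search: j = min of the non-(-1) finds of ' && ' / ' compare ', else end
def pvBoundJ (m : List Char) : Nat :=
  if PySem.Chars.find m [' ', '&', '&', ' '] = -1 ∧ PySem.Chars.find m [' ', 'c', 'o', 'm', 'p', 'a', 'r', 'e', ' '] = -1 then m.length
  else if PySem.Chars.find m [' ', '&', '&', ' '] = -1 then (PySem.Chars.find m [' ', 'c', 'o', 'm', 'p', 'a', 'r', 'e', ' ']).toNat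
  else if PySem.Chars.find m [' ', 'c', 'o', 'm', 'p', 'a', 'r', 'e', ' '] = -1 then (PySem.Chars.find m [' ', '&', '&', ' ']).toNat
  else (min (PySem.Chars.find m [' ', '&', '&', ' ']) (PySem.Chars.find m [' ', 'c', 'o', 'm', 'p', 'a', 'r', 'e', ' '])).toNat

-- cited by pvScanB's decreasing_by
theorem pvTokFind_add_two_le {l : List Char} {p : Nat} (h : pvTokFind l = some p) :
    p + 2 ≤ l.length := by
  have hcase : (['r', ':'] <+: l.drop p) ∨ (['n', ':'] <+: l.drop p) := by
    unfold pvTokFind at h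
    split at h
    · exact absurd h (by simp)
    · rename_i hn
      split at h
      · rename_i hr
        have hnn : (0:Int) ≤ PySem.Chars.find l ['n', ':'] := by
          have := PySem.Chars.neg_one_le_find l ['n', ':']
          rcases (lt_or_eq_of_le this) with h' | h'
          · omega
          · exact absurd h'.symm (by tauto)
        right
        have := (PySem.Chars.find_spec hnn).1
        simpa [← Option.some_inj.mp h] using this
      · rename_i hr
        have hrn : (0:Int) ≤ PySem.Chars.find l ['r', ':'] := by
          have := PySem.Chars.neg_one_le_find l ['r', ':']
          omega
        split at h
        · left
          have := (PySem.Chars.find_spec hrn).1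
          simpa [← Option.some_inj.mp h] using this
        · rename_i hnne
          have hnn : (0:Int) ≤ PySem.Chars.find l ['n', ':'] := by
            have := PySem.Chars.neg_one_le_find l ['n', ':']
            omega
          rcases le_total (PySem.Chars.find l ['r', ':']) (PySem.Chars.find l ['n', ':']) with hle | hle
          · left
            have := (PySem.Chars.find_spec hrn).1
            have hm : (min (PySem.Chars.find l ['r', ':']) (PySem.Chars.find l ['n', ':'])) = PySem.Chars.find l ['r', ':'] := min_eq_left hle
            rw [hm] at h
            simpa [← Option.some_inj.mp h] using this
          · right
            have := (PySem.Chars.find_spec hnn).1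
            have hm : (min (PySem.Chars.find l ['r', ':']) (PySem.Chars.find l ['n', ':'])) = PySem.Chars.find l ['n', ':'] := min_eq_right hle
            rw [hm] at h
            simpa [← Option.some_inj.mp h] using this
  rcases hcase with hoc | hoc <;>
  · have := hoc.length_le
    simp at this
    omega

-- B's main loop, on the suffix starting at i
def pvScanB (quote_char : Option String) (l : List Char) : List Char :=
  match h : pvTokFind l with
  | none => l
  | some p =>
    let start := if 0 < p ∧ l[p-1]? = some '!' then p - 1 else p
    let after := l.drop (p + 2)
    let j := pvBoundJ after
    l.take start ++ (l.drop start).take (p + 2 - start)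
      ++ pvEscape quote_char [] (after.take j) ++ pvScanB quote_char (after.drop j)
termination_by l.length
decreasing_by
  have := pvTokFind_add_two_le h
  simp
  omega

def swap_in_rn_tokens_quants_alt (text : String) (quote_char : Option String) : String × Bool :=
  let updated := String.ofList (pvScanB quote_char text.toList)
  (updated, updated != text)

-- ===== PRECONDITION & SPEC =====
def Spec_swap_in_rn_tokens_quants (text : String) (quote_char : Option String) (out : String × Bool) : Prop := out = swap_in_rn_tokens_quants_alt text quote_char
instance (text : String) (quote_char : Option String) (out : String × Bool) : Decidable (Spec_swap_in_rn_tokens_quants text quote_char out) := by unfold Spec_swap_in_rn_tokens_quants; infer_instance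

-- ===== CLAIM (what is proved, stated in full; the proofs are below) =====
def Claim_equal_swap_in_rn_tokens_quants : Prop := ∀ (text : String) (quote_char : Option String), Dom_swap_in_rn_tokens_quants text quote_char → Spec_swap_in_rn_tokens_quants text quote_char (swap_in_rn_tokens_quants text quote_char)

-- ===== LEMMAS AND PROOFS =====

-- token occurrence predicate: an `r:` or `n:` occurrence at offset q
def pvTok (l : List Char) (q : Nat) : Prop :=
  (['r', ':'] <+: l.drop q) ∨ (['n', ':'] <+: l.drop q)

-- boundary occurrence predicate
def pvBnd (m : List Char) (q : Nat) : Prop :=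
  ([' ', '&', '&', ' '] <+: m.drop q) ∨ ([' ', 'c', 'o', 'm', 'p', 'a', 'r', 'e', ' '] <+: m.drop q)

theorem pv_find_cons {pat : List Char} {c : Char} {t : List Char}
    (h0 : ¬ pat <+: (c :: t)) :
    PySem.Chars.find (c :: t) pat =
      (if PySem.Chars.find t pat = -1 then -1 else PySem.Chars.find t pat + 1) := by
  have hiffT : PySem.Chars.isIn pat t = true ↔ ∃ j, pat <+: t.drop j :=
    (PySem.Chars.exists_prefix_drop_iff_isIn pat t).symm
  have hiffL : PySem.Chars.isIn pat (c :: t) = true ↔ ∃ j, pat <+: (c :: t).drop j :=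
    (PySem.Chars.exists_prefix_drop_iff_isIn pat (c :: t)).symm
  split
  · rename_i hm1
    have hnt : ¬ pat <:+: t := (PySem.Chars.find_eq_neg_one_iff t pat).mp hm1
    rw [PySem.Chars.find_eq_neg_one_iff]
    intro hinf
    rcases hiffL.mp ((PySem.Chars.isIn_iff_infix pat (c::t)).mpr hinf) with ⟨j, hj⟩
    match j, hj with
    | 0, hj => exact h0 hj
    | j+1, hj =>
      exact hnt ((PySem.Chars.isIn_iff_infix pat t).mp (hiffT.mpr ⟨j, by simpa using hj⟩))
  · rename_i hm1
    have hge : 0 ≤ PySem.Chars.find t pat := by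
      have := PySem.Chars.neg_one_le_find t pat; omega
    obtain ⟨hpre, hmin⟩ := PySem.Chars.find_spec hge
    have hinfL : pat <:+: (c :: t) := by
      apply (PySem.Chars.isIn_iff_infix pat (c::t)).mp
      exact hiffL.mpr ⟨(PySem.Chars.find t pat).toNat + 1, by simpa using hpre⟩
    have hgeL : 0 ≤ PySem.Chars.find (c :: t) pat :=
      (PySem.Chars.find_nonneg_iff (c::t) pat).mpr hinfL
    obtain ⟨hpreL, hminL⟩ := PySem.Chars.find_spec hgeL
    have hFne : (PySem.Chars.find (c :: t) pat).toNat ≠ 0 := by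
      intro h; rw [h] at hpreL; exact h0 (by simpa using hpreL)
    have h1 : (PySem.Chars.find t pat).toNat ≤ (PySem.Chars.find (c :: t) pat).toNat - 1 := by
      by_contra hlt
      push_neg at hlt
      refine hmin _ (by omega) ?_
      have := hpreL
      rcases Nat.exists_eq_add_of_lt (Nat.pos_of_ne_zero hFne) with ⟨k, hk⟩
      simpa [show (PySem.Chars.find (c :: t) pat).toNat = k + 1 by omega] using this
    have h2 : (PySem.Chars.find (c :: t) pat).toNat ≤ (PySem.Chars.find t pat).toNat + 1 := by
      by_contra hlt
      push_neg at hlt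
      exact hminL _ (by omega) (by simpa using hpre)
    omega

-- generic "min of two finds", the shape shared by pvTokFind and pvBoundJ
def pvFind2 (p1 p2 l : List Char) : Option Nat :=
  if PySem.Chars.find l p1 = -1 ∧ PySem.Chars.find l p2 = -1 then none
  else if PySem.Chars.find l p1 = -1 then some (PySem.Chars.find l p2).toNat
  else if PySem.Chars.find l p2 = -1 then some (PySem.Chars.find l p1).toNat
  else some (min (PySem.Chars.find l p1) (PySem.Chars.find l p2)).toNat

theorem pvTokFind_eq (l : List Char) : pvTokFind l = pvFind2 ['r', ':'] ['n', ':'] l := rfl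

theorem pvBoundJ_eq (m : List Char) :
    pvBoundJ m = (pvFind2 [' ', '&', '&', ' '] [' ', 'c', 'o', 'm', 'p', 'a', 'r', 'e', ' '] m).getD m.length := by
  unfold pvBoundJ pvFind2
  split
  · simp
  · split
    · simp
    · split <;> simp

theorem pv_no_occ {pat l : List Char} (h : PySem.Chars.find l pat = -1) :
    ∀ q, ¬ pat <+: l.drop q := by
  intro q hq
  exact ((PySem.Chars.find_eq_neg_one_iff l pat).mp h)
    ((PySem.Chars.isIn_iff_infix pat l).mp
      ((PySem.Chars.exists_prefix_drop_iff_isIn pat l).mp ⟨q, hq⟩))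

theorem pvFind2_none {p1 p2 l : List Char} (h : pvFind2 p1 p2 l = none) :
    ∀ q, ¬ (p1 <+: l.drop q ∨ p2 <+: l.drop q) := by
  unfold pvFind2 at h
  split at h
  · rename_i hb
    intro q hq
    rcases hq with hq | hq
    · exact pv_no_occ hb.1 q hq
    · exact pv_no_occ hb.2 q hq
  · split at h
    · simp at h
    · split at h <;> simp at h

theorem pvFind2_some {p1 p2 l : List Char} {q : Nat} (h : pvFind2 p1 p2 l = some q) :
    (p1 <+: l.drop q ∨ p2 <+: l.drop q) ∧
      ∀ r, r < q → ¬ (p1 <+: l.drop r ∨ p2 <+: l.drop r) := by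
  unfold pvFind2 at h
  split at h
  · simp at h
  · rename_i hb
    push_neg at hb
    split at h
    · rename_i h1
      have h2 : 0 ≤ PySem.Chars.find l p2 := by
        have := PySem.Chars.neg_one_le_find l p2
        rcases eq_or_lt_of_le this with h' | h'
        · exact absurd h'.symm (hb h1)
        · omega
      obtain ⟨hpre, hmin⟩ := PySem.Chars.find_spec h2
      have hq : q = (PySem.Chars.find l p2).toNat := (Option.some_inj.mp h).symm
      subst hq
      refine ⟨Or.inr hpre, fun r hr hocc => ?_⟩
      rcases hocc with hocc | hocc
      · exact pv_no_occ h1 r hocc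
      · exact hmin r hr hocc
    · rename_i h1
      have hg1 : 0 ≤ PySem.Chars.find l p1 := by
        have := PySem.Chars.neg_one_le_find l p1; omega
      obtain ⟨hpre1, hmin1⟩ := PySem.Chars.find_spec hg1
      split at h
      · rename_i h2
        have hq : q = (PySem.Chars.find l p1).toNat := (Option.some_inj.mp h).symm
        subst hq
        refine ⟨Or.inl hpre1, fun r hr hocc => ?_⟩
        rcases hocc with hocc | hocc
        · exact hmin1 r hr hocc
        · exact pv_no_occ h2 r hocc
      · rename_i h2
        have hg2 : 0 ≤ PySem.Chars.find l p2 := by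
          have := PySem.Chars.neg_one_le_find l p2; omega
        obtain ⟨hpre2, hmin2⟩ := PySem.Chars.find_spec hg2
        have hq : q = (min (PySem.Chars.find l p1) (PySem.Chars.find l p2)).toNat :=
          (Option.some_inj.mp h).symm
        subst hq
        constructor
        · rcases le_total (PySem.Chars.find l p1) (PySem.Chars.find l p2) with hle | hle
          · rw [min_eq_left hle]; exact Or.inl hpre1
          · rw [min_eq_right hle]; exact Or.inr hpre2
        · intro r hr hocc
          have hr1 : r < (PySem.Chars.find l p1).toNat := by
            have := min_le_left (PySem.Chars.find l p1) (PySem.Chars.find l p2); omega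
          have hr2 : r < (PySem.Chars.find l p2).toNat := by
            have := min_le_right (PySem.Chars.find l p1) (PySem.Chars.find l p2); omega
          rcases hocc with hocc | hocc
          · exact hmin1 r hr1 hocc
          · exact hmin2 r hr2 hocc

theorem pvFind2_cons {p1 p2 : List Char} {c : Char} {t : List Char}
    (h0 : ¬ (p1 <+: (c :: t) ∨ p2 <+: (c :: t))) :
    pvFind2 p1 p2 (c :: t) = (pvFind2 p1 p2 t).map (· + 1) := by
  push_neg at h0
  rw [show pvFind2 p1 p2 (c :: t) =
      (if PySem.Chars.find (c :: t) p1 = -1 ∧ PySem.Chars.find (c :: t) p2 = -1 then none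
       else if PySem.Chars.find (c :: t) p1 = -1 then some (PySem.Chars.find (c :: t) p2).toNat
       else if PySem.Chars.find (c :: t) p2 = -1 then some (PySem.Chars.find (c :: t) p1).toNat
       else some (min (PySem.Chars.find (c :: t) p1) (PySem.Chars.find (c :: t) p2)).toNat) from rfl]
  rw [pv_find_cons h0.1, pv_find_cons h0.2]
  have n1 := PySem.Chars.neg_one_le_find t p1
  have n2 := PySem.Chars.neg_one_le_find t p2
  unfold pvFind2
  split_ifs <;>
    first
      | rfl
      | (exfalso; omega)
      | (simp only [Option.map_some, Option.some.injEq]; omega)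

theorem pvTok_iff_isBoundary (m : List Char) : pvIsBoundary m = true ↔ pvBnd m 0 := by
  unfold pvIsBoundary pvBnd
  simp [PySem.Chars.startswith_iff]

theorem pvBoundJ_cons {c : Char} {t : List Char} (h : ¬ pvBnd (c :: t) 0) :
    pvBoundJ (c :: t) = pvBoundJ t + 1 := by
  unfold pvBnd at h
  simp only [List.drop_zero] at h
  rw [pvBoundJ_eq, pvBoundJ_eq, pvFind2_cons h]
  cases pvFind2 [' ', '&', '&', ' '] [' ', 'c', 'o', 'm', 'p', 'a', 'r', 'e', ' '] t <;> simp

theorem pvBoundJ_zero {m : List Char} (h : pvBnd m 0) : pvBoundJ m = 0 := by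
  rw [pvBoundJ_eq]
  rcases hq : pvFind2 [' ', '&', '&', ' '] [' ', 'c', 'o', 'm', 'p', 'a', 'r', 'e', ' '] m with _ | q
  · exact absurd h (pvFind2_none hq 0)
  · obtain ⟨_, hmin⟩ := pvFind2_some hq
    have : q = 0 := by
      by_contra hne
      exact hmin 0 (Nat.pos_of_ne_zero hne) h
    simp [this]

theorem pvReadUntil_eq (m : List Char) :
    pvReadUntil m = (m.take (pvBoundJ m), m.drop (pvBoundJ m)) := by
  induction m with
  | nil => simp [pvReadUntil, pvBoundJ]
  | cons c t ih =>
    rw [pvReadUntil]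
    by_cases hb : pvBnd (c :: t) 0
    · rw [if_pos ((pvTok_iff_isBoundary (c :: t)).mpr hb), pvBoundJ_zero hb]
      simp
    · rw [if_neg (by simp [pvTok_iff_isBoundary (c :: t), hb]), pvBoundJ_cons hb, ih]
      simp

theorem pvScanB_none {quote_char : Option String} {l : List Char}
    (h : pvTokFind l = none) : pvScanB quote_char l = l := by
  unfold pvScanB
  split
  · rfl
  · rename_i heq
    rw [h] at heq
    exact absurd heq (by simp)

theorem pvScanB_some {quote_char : Option String} {l : List Char} {p : Nat}
    (h : pvTokFind l = some p) :
    pvScanB quote_char l =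
      l.take (if 0 < p ∧ l[p-1]? = some '!' then p - 1 else p)
        ++ (l.drop (if 0 < p ∧ l[p-1]? = some '!' then p - 1 else p)).take
             (p + 2 - (if 0 < p ∧ l[p-1]? = some '!' then p - 1 else p))
        ++ pvEscape quote_char [] ((l.drop (p + 2)).take (pvBoundJ (l.drop (p + 2))))
        ++ pvScanB quote_char ((l.drop (p + 2)).drop (pvBoundJ (l.drop (p + 2)))) := by
  conv_lhs => unfold pvScanB
  split
  · rename_i heq
    rw [h] at heq
    exact absurd heq (by simp)
  · rename_i p' heq
    rw [h] at heq
    have : p' = p := by simpa using heq.symm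
    subst this
    simp

theorem pvScanA_no_tok (quote_char : Option String) :
    ∀ l : List Char, (∀ q, ¬ pvTok l q) → pvScanA quote_char l = l := by
  intro l
  induction l with
  | nil => intro _; rw [pvScanA.eq_def]
  | cons c0 t0 ih =>
    intro h
    have ht : ∀ q, ¬ pvTok t0 q := by
      intro q hq
      exact h (q + 1) (by simpa [pvTok] using hq)
    cases t0 with
    | nil => rw [pvScanA.eq_def]
    | cons c1 t1 =>
      have h0 : ¬ pvTok (c0 :: c1 :: t1) 0 := h 0
      rw [pvScanA.eq_def]
      dsimp only
      by_cases hc0 : c0 = '!'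
      · cases t1 with
        | nil =>
          rw [if_pos hc0]
          dsimp only
          rw [ih ht]
        | cons c2 t2 =>
          rw [if_pos hc0]
          dsimp only
          have h1 : ¬ pvTok (c0 :: c1 :: c2 :: t2) 1 := h 1
          rw [if_neg (by
            rintro ⟨hrn, hcol⟩
            apply h1
            unfold pvTok
            rcases hrn with hr | hr <;> [left; right] <;>
              simp [hr, hcol, List.cons_prefix_cons])]
          rw [ih ht]
      · rw [if_neg hc0]
        rw [if_neg (by
          rintro ⟨hrn, hcol⟩
          apply h0
          unfold pvTok
          rcases hrn with hr | hr <;> [left; right] <;>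
            simp [hr, hcol, List.cons_prefix_cons])]
        rw [ih ht]

theorem pvScanB_cons {quote_char : Option String} {c : Char} {t : List Char} {p : Nat}
    (h : pvTokFind (c :: t) = some p) (hp : 1 ≤ p) (hne : ¬ (p = 1 ∧ c = '!')) :
    pvScanB quote_char (c :: t) = c :: pvScanB quote_char t := by
  have h0 : ¬ pvTok (c :: t) 0 := (pvFind2_some ((pvTokFind_eq _) ▸ h)).2 0 hp
  have hcons := pvFind2_cons (p1 := ['r', ':']) (p2 := ['n', ':']) (c := c) (t := t)
    (by simpa [pvTok] using h0)
  have htokt : pvTokFind t = some (p - 1) := by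
    have hF : pvFind2 ['r', ':'] ['n', ':'] (c :: t) = some p := (pvTokFind_eq (c :: t)) ▸ h
    rw [hcons] at hF
    rw [pvTokFind_eq]
    cases hft : pvFind2 ['r', ':'] ['n', ':'] t with
    | none => rw [hft] at hF; simp at hF
    | some q =>
      rw [hft] at hF
      simp only [Option.map_some, Option.some.injEq] at hF
      simp [← hF]
  rw [pvScanB_some h, pvScanB_some htokt]
  have hs : (if 0 < p ∧ (c :: t)[p-1]? = some '!' then p - 1 else p)
      = (if 0 < p - 1 ∧ t[p-1-1]? = some '!' then p - 1 - 1 else p - 1) + 1 := by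
    by_cases hp1 : p = 1
    · subst hp1
      rw [if_neg (by rintro ⟨-, hb⟩; exact hne ⟨rfl, by simpa using hb⟩)]
      rw [if_neg (by rintro ⟨hz, -⟩; exact absurd hz (by omega))]
    · have hp2 : 2 ≤ p := by omega
      have hidx : (c :: t)[p-1]? = t[p-1-1]? := by
        rw [show p - 1 = (p - 1 - 1) + 1 by omega]
        simp
      rw [hidx]
      by_cases hcond : 0 < p - 1 ∧ t[p-1-1]? = some '!'
      · rw [if_pos ⟨by omega, hcond.2⟩, if_pos hcond]; omega
      · rw [if_neg (by rintro ⟨-, hb⟩; exact hcond ⟨by omega, hb⟩), if_neg hcond]; omega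
  rw [hs]
  rw [List.take_succ_cons, List.drop_succ_cons]
  rw [show p + 2 = (p + 1) + 1 by omega, List.drop_succ_cons]
  rw [show p - 1 + 2 = p + 1 by omega]
  rw [show p + 1 + 1 - ((if 0 < p - 1 ∧ t[p-1-1]? = some '!' then p - 1 - 1 else p - 1) + 1)
      = p - 1 + 2 - (if 0 < p - 1 ∧ t[p-1-1]? = some '!' then p - 1 - 1 else p - 1) by omega]
  rw [show p - 1 + 2 = p + 1 by omega]
  simp

theorem pvScan_eq (quote_char : Option String) :
    ∀ (n : Nat) (l : List Char), l.length ≤ n → pvScanA quote_char l = pvScanB quote_char l := by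
  intro n
  induction n with
  | zero =>
    intro l hl
    have hnil : l = [] := List.eq_nil_of_length_eq_zero (Nat.le_zero.mp hl)
    subst hnil
    rw [pvScanA.eq_def, pvScanB_none (by decide)]
  | succ n ih =>
    intro l hl
    cases htok : pvTokFind l with
    | none =>
      rw [pvScanB_none htok, pvScanA_no_tok]
      exact fun q => pvFind2_none ((pvTokFind_eq l) ▸ htok) q
    | some p =>
      obtain ⟨hocc, hmin⟩ := pvFind2_some ((pvTokFind_eq l) ▸ htok)
      have hlen2 := pvTokFind_add_two_le htok
      by_cases hhead : p = 0 ∨ (p = 1 ∧ l[0]? = some '!')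
      · -- the token starts at the head of the suffix
        rcases hhead with hp0 | ⟨hp1, hbang⟩
        · subst hp0
          simp only [List.drop_zero] at hocc
          rw [pvScanB_some htok]
          rw [if_neg (by rintro ⟨hz, -⟩; exact absurd hz (by omega))]
          simp only [List.take_zero, List.drop_zero, List.nil_append, Nat.sub_zero]
          rcases hocc with hoc | hoc <;>
          · obtain ⟨rest, rfl⟩ := hoc
            simp only [List.cons_append, List.nil_append]
            rw [pvScanA.eq_def]
            dsimp only
            rw [if_neg (by decide), if_pos (by simp)]
            rw [pvReadUntil_eq rest]
            dsimp only
            rw [ih (rest.drop (pvBoundJ rest))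
              (by simp at hl ⊢; omega)]
            simp
        · -- l = '!' :: x :: ':' :: rest
          cases l with
          | nil => simp at hbang
          | cons c t =>
            have hc : c = '!' := by simpa using hbang
            subst hc hp1
            simp only [List.drop_succ_cons, List.drop_zero] at hocc
            rw [pvScanB_some htok]
            rw [if_pos ⟨Nat.one_pos, by simpa using hbang⟩]
            simp only [Nat.sub_self, List.take_zero, List.drop_zero, List.nil_append, Nat.sub_zero]
            rcases hocc with hoc | hoc <;>
            · obtain ⟨rest, rfl⟩ := hoc
              simp only [List.cons_append, List.nil_append]
              rw [pvScanA.eq_def]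
              dsimp only
              rw [if_pos rfl, if_pos (by simp)]
              rw [pvReadUntil_eq rest]
              dsimp only
              rw [ih (rest.drop (pvBoundJ rest))
                (by simp at hl ⊢; omega)]
              simp
      · -- the head character is copied verbatim by both scanners
        push_neg at hhead
        have hp1 : 1 ≤ p := Nat.one_le_iff_ne_zero.mpr hhead.1
        cases l with
        | nil => simp at hlen2
        | cons c t =>
          have hA : pvScanA quote_char (c :: t) = c :: pvScanA quote_char t := by
            cases t with
            | nil => simp at hlen2
            | cons c1 t1 =>
              rw [pvScanA.eq_def]
              dsimp only
              by_cases hc0 : c = '!'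
              · cases t1 with
                | nil => rw [if_pos hc0]
                | cons c2 t2 =>
                  rw [if_pos hc0]
                  dsimp only
                  rw [if_neg (by
                    rintro ⟨hrn, hcol⟩
                    have h1p : 1 < p := by
                      rcases Nat.lt_or_ge 1 p with h' | h'
                      · exact h'
                      · exfalso
                        exact hhead.2 (by omega) (by simp [hc0])
                    refine hmin 1 h1p ?_
                    rcases hrn with hr | hr <;> [left; right] <;>
                      simp [hr, hcol, List.cons_prefix_cons])]
              · rw [if_neg hc0]
                rw [if_neg (by
                  rintro ⟨hrn, hcol⟩
                  refine hmin 0 hp1 ?_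
                  rcases hrn with hr | hr <;> [left; right] <;>
                    simp [hr, hcol, List.cons_prefix_cons])]
          have hB : pvScanB quote_char (c :: t) = c :: pvScanB quote_char t :=
            pvScanB_cons htok hp1 (by
              rintro ⟨hpe, hce⟩
              exact hhead.2 hpe (by simp [hce]))
          rw [hA, hB, ih t (by simpa using Nat.le_of_succ_le_succ (by simpa using hl))]

-- ===== VERDICT (by name: the statement is the Claim_ definition above) =====
theorem swap_in_rn_tokens_quants_spec : Claim_equal_swap_in_rn_tokens_quants := by
  intro text quote_char _
  unfold Spec_swap_in_rn_tokens_quants swap_in_rn_tokens_quants swap_in_rn_tokens_quants_alt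
  simp only [pvScan_eq quote_char text.toList.length text.toList le_rfl]
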